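-- pv_equiv track=rewrite | github.com/soongenwong/synapse-health-ai | main.py | get_visual_recommendations
-- ===== SOURCE A (Python) =====
-- from typing import Dict, List, Tuple
-- from typing import Dict, List, Optional
--
-- def get_visual_recommendations(symptoms: List[str], urgency: str) -> List[str]:
--     """Get specific recommendations based on visual symptoms"""
--     recommendations = []
--     if urgency == "HIGH":
--         recommendations = [
--             "Seek immediate medical attention",
--             "Do not touch or further irritate the area",
--             "Keep the area clean and covered if possible",
--             "Go to A&E or call 999 if bleeding severely"
--         ]
--     elif urgency == "MEDIUM":
--         recommendations = [
--             "Clean the area gently with water",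
--             "Apply appropriate first aid",
--             "Monitor for signs of infection",
--             "Contact GP if symptoms worsen"
--         ]
--     else:
--         recommendations = [
--             "Keep the area clean and dry",
--             "Apply basic first aid if needed",
--             "Monitor for any changes",
--             "Contact healthcare provider if concerned"
--         ]
--     if any('rash' in symptom for symptom in symptoms):
--         recommendations.extend([
--             "Avoid scratching the affected area",
--             "Use cool compresses if itchy",
--             "Consider antihistamines for allergic reactions"
--         ])
--     elif any('cut' in symptom or 'laceration' in symptom for symptom in symptoms):
--         recommendations.extend([
--             "Apply pressure to stop bleeding",
--             "Clean with antiseptic",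
--             "Consider tetanus shot if wound is deep"
--         ])
--     elif any('bruise' in symptom or 'contusion' in symptom for symptom in symptoms):
--         recommendations.extend([
--             "Apply ice to reduce swelling",
--             "Elevate the affected area if possible",
--             "Take over-the-counter pain relief as needed"
--         ])
--     return recommendations
-- ===== SOURCE B (Python) =====
-- from typing import List
--
-- _BASES = [
--     ["Seek immediate medical attention",
--      "Do not touch or further irritate the area",
--      "Keep the area clean and covered if possible",
--      "Go to A&E or call 999 if bleeding severely"],
--     ["Clean the area gently with water",
--      "Apply appropriate first aid",
--      "Monitor for signs of infection",
--      "Contact GP if symptoms worsen"],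
--     ["Keep the area clean and dry",
--      "Apply basic first aid if needed",
--      "Monitor for any changes",
--      "Contact healthcare provider if concerned"],
-- ]
--
-- _EXTRAS = [
--     ["Avoid scratching the affected area",
--      "Use cool compresses if itchy",
--      "Consider antihistamines for allergic reactions"],
--     ["Apply pressure to stop bleeding",
--      "Clean with antiseptic",
--      "Consider tetanus shot if wound is deep"],
--     ["Apply ice to reduce swelling",
--      "Elevate the affected area if possible",
--      "Take over-the-counter pain relief as needed"],
--     [],
-- ]
--
-- def _priority(s: str) -> int:
--     if 'rash' in s:
--         return 0
--     if 'cut' in s or 'laceration' in s: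
--         return 1
--     if 'bruise' in s or 'contusion' in s:
--         return 2
--     return 3
--
-- def get_visual_recommendations(symptoms: List[str], urgency: str) -> List[str]:
--     best = 3
--     for s in symptoms:
--         best = min(best, _priority(s))
--     idx = 0 if urgency == "HIGH" else (1 if urgency == "MEDIUM" else 2)
--     return _BASES[idx] + _EXTRAS[best]
-- ===== Notes on version B (the rewrite author's own statement) =====
-- stated objective: alternative
-- what changed: Instead of A's staged any()-scans with an elif chain over categories, B makes one pass over the symptoms computing the minimum category priority per symptom (0=rash, 1=cut/laceration, 2=bruise/contusion, 3=none) with a min-accumulator, then builds the result by indexing a bases table and an extras table with that priority.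
import Mathlib
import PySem

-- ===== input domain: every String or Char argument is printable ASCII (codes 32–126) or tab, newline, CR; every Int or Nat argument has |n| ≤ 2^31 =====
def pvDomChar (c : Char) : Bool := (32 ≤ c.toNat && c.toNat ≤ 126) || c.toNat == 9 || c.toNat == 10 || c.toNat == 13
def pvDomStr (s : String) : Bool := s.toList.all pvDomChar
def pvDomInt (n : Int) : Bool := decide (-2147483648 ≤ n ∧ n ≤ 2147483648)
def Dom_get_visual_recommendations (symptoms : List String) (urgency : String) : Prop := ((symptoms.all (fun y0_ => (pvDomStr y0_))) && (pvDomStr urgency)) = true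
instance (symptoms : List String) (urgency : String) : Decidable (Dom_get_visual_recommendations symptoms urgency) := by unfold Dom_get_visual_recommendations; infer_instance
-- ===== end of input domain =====

-- B replaces A's staged any()-scans + elif chain with ONE pass over the symptoms computing the
-- minimum category priority (min-accumulator), then a single table-indexed concatenation — alternative decomposition, same cost.


-- ===== PORT A =====
def get_visual_recommendations (symptoms : List String) (urgency : String) : List String :=
  let recommendations :=
    if urgency == "HIGH" then
      ["Seek immediate medical attention", "Do not touch or further irritate the area", "Keep the area clean and covered if possible", "Go to A&E or call 999 if bleeding severely"]
    else if urgency == "MEDIUM" then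
      ["Clean the area gently with water", "Apply appropriate first aid", "Monitor for signs of infection", "Contact GP if symptoms worsen"]
    else
      ["Keep the area clean and dry", "Apply basic first aid if needed", "Monitor for any changes", "Contact healthcare provider if concerned"]
  if symptoms.any (fun symptom => PySem.Str.isIn "rash" symptom) then
    recommendations ++ ["Avoid scratching the affected area", "Use cool compresses if itchy", "Consider antihistamines for allergic reactions"]
  else if symptoms.any (fun symptom => PySem.Str.isIn "cut" symptom || PySem.Str.isIn "laceration" symptom) then
    recommendations ++ ["Apply pressure to stop bleeding", "Clean with antiseptic", "Consider tetanus shot if wound is deep"]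
  else if symptoms.any (fun symptom => PySem.Str.isIn "bruise" symptom || PySem.Str.isIn "contusion" symptom) then
    recommendations ++ ["Apply ice to reduce swelling", "Elevate the affected area if possible", "Take over-the-counter pain relief as needed"]
  else
    recommendations

-- ===== PORT B =====
def gvrBases : List (List String) :=
  [["Seek immediate medical attention", "Do not touch or further irritate the area", "Keep the area clean and covered if possible", "Go to A&E or call 999 if bleeding severely"],
   ["Clean the area gently with water", "Apply appropriate first aid", "Monitor for signs of infection", "Contact GP if symptoms worsen"],
   ["Keep the area clean and dry", "Apply basic first aid if needed", "Monitor for any changes", "Contact healthcare provider if concerned"]]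

def gvrExtras : List (List String) :=
  [["Avoid scratching the affected area", "Use cool compresses if itchy", "Consider antihistamines for allergic reactions"],
   ["Apply pressure to stop bleeding", "Clean with antiseptic", "Consider tetanus shot if wound is deep"],
   ["Apply ice to reduce swelling", "Elevate the affected area if possible", "Take over-the-counter pain relief as needed"],
   []]

def gvrPriority (s : String) : Nat :=
  if PySem.Str.isIn "rash" s then 0
  else if PySem.Str.isIn "cut" s || PySem.Str.isIn "laceration" s then 1
  else if PySem.Str.isIn "bruise" s || PySem.Str.isIn "contusion" s then 2
  else 3

def get_visual_recommendations_alt (symptoms : List String) (urgency : String) : List String :=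
  let best := symptoms.foldl (fun b s => min b (gvrPriority s)) 3
  let idx := if urgency == "HIGH" then 0 else if urgency == "MEDIUM" then 1 else 2
  gvrBases.getD idx [] ++ gvrExtras.getD best []

-- ===== PRECONDITION & SPEC =====
def Spec_get_visual_recommendations (symptoms : List String) (urgency : String) (out : List String) : Prop := out = get_visual_recommendations_alt symptoms urgency
instance (symptoms : List String) (urgency : String) (out : List String) : Decidable (Spec_get_visual_recommendations symptoms urgency out) := by unfold Spec_get_visual_recommendations; infer_instance

-- ===== CLAIM (what is proved, stated in full; the proofs are below) =====
def Claim_equal_get_visual_recommendations : Prop := ∀ (symptoms : List String) (urgency : String), Dom_get_visual_recommendations symptoms urgency → Spec_get_visual_recommendations symptoms urgency (get_visual_recommendations symptoms urgency)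

-- ===== LEMMAS AND PROOFS =====
-- gvrSel x y z = index of the first true flag (3 if none): the shape of gvrPriority and of the elif chain
def gvrSel (x y z : Bool) : Nat := if x then 0 else if y then 1 else if z then 2 else 3

theorem gvrPriority_eq_sel (s : String) :
    gvrPriority s = gvrSel (PySem.Str.isIn "rash" s)
      (PySem.Str.isIn "cut" s || PySem.Str.isIn "laceration" s)
      (PySem.Str.isIn "bruise" s || PySem.Str.isIn "contusion" s) := rfl

theorem gvrPriority_le (s : String) : gvrPriority s ≤ 3 := by
  unfold gvrPriority; split_ifs <;> omega

theorem gvrSel_min (x y z x' y' z' : Bool) :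
    min (gvrSel x y z) (gvrSel x' y' z') = gvrSel (x || x') (y || y') (z || z') := by
  cases x <;> cases y <;> cases z <;> cases x' <;> cases y' <;> cases z' <;> decide

theorem gvr_foldl_min_shift (l : List String) (b : Nat) (hb : b ≤ 3) :
    l.foldl (fun b s => min b (gvrPriority s)) b
      = min b (l.foldl (fun b s => min b (gvrPriority s)) 3) := by
  induction l generalizing b with
  | nil => simp [List.foldl]; omega
  | cons s l ih =>
      simp only [List.foldl]
      have hp := gvrPriority_le s
      rw [ih (min b (gvrPriority s)) (by omega), ih (min 3 (gvrPriority s)) (by omega)]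
      omega

theorem gvr_best_eq (l : List String) :
    l.foldl (fun b s => min b (gvrPriority s)) 3
      = gvrSel (l.any (fun s => PySem.Str.isIn "rash" s))
          (l.any (fun s => PySem.Str.isIn "cut" s || PySem.Str.isIn "laceration" s))
          (l.any (fun s => PySem.Str.isIn "bruise" s || PySem.Str.isIn "contusion" s)) := by
  induction l with
  | nil => rfl
  | cons s l ih =>
      simp only [List.foldl, List.any_cons]
      have hp := gvrPriority_le s
      rw [gvr_foldl_min_shift l (min 3 (gvrPriority s)) (by omega), ih]
      have h3 : min 3 (gvrPriority s) = gvrPriority s := by omega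
      rw [h3, gvrPriority_eq_sel, gvrSel_min]

-- ===== VERDICT (by name: the statement is the Claim_ definition above) =====
theorem get_visual_recommendations_spec : Claim_equal_get_visual_recommendations := by
  intro symptoms urgency _
  unfold Spec_get_visual_recommendations get_visual_recommendations get_visual_recommendations_alt
  rw [gvr_best_eq]
  cases h1 : symptoms.any (fun s => PySem.Str.isIn "rash" s) <;>
  cases h2 : symptoms.any (fun s => PySem.Str.isIn "cut" s || PySem.Str.isIn "laceration" s) <;>
  cases h3 : symptoms.any (fun s => PySem.Str.isIn "bruise" s || PySem.Str.isIn "contusion" s) <;>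
  cases h4 : urgency == "HIGH" <;>
  cases h5 : urgency == "MEDIUM" <;>
    simp [gvrSel, gvrBases, gvrExtras]
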